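-- pv_equiv track=rewrite | github.com/mobiusframeworks/teslaa-model-y | scrapers/facebook_parser.py | extract_make_model
-- ===== SOURCE A (Python) =====
-- def extract_make_model(text: str) -> tuple:
--     """Extract make and model from text with normalized capitalization"""
--     text = text.lower()
--
--     # Known makes and their common models
--     makes_models = {
--         'lexus': {
--             'models': ['gx', 'lx', 'rx', 'nx', 'es', 'is', 'gs', 'rc', 'ls'],
--             'full_names': {
--                 'gx 460': 'GX',
--                 'gx 550': 'GX',
--                 'lx 570': 'LX',
--                 'lx 600': 'LX',
--                 'rx 350': 'RX',
--                 'rx 400h': 'RX',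
--                 'es 350': 'ES',
--                 'is 350': 'IS',
--                 'gs 350': 'GS',
--                 'gs f': 'GS',
--                 'rc 350': 'RC',
--                 'ls 500': 'LS',
--                 'nx 350': 'NX'
--             }
--         },
--         'toyota': {
--             'models': ['tacoma', 'tundra', 'sequoia', '4runner', 'highlander', 'camry', 'corolla', 'hilux'],
--             'full_names': {
--                 'hilux surf': 'Hilux',
--                 'hilux': 'Hilux'
--             }
--         },
--         'ford': {
--             'models': ['f-150', 'f150', 'f-250', 'f250', 'explorer', 'expedition'],
--             'full_names': {
--                 'f-150': 'F-150',
--                 'f150': 'F-150',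
--                 'f-250': 'F-250',
--                 'f250': 'F-250'
--             }
--         },
--         'tesla': {
--             'models': ['model y', 'model 3', 'model s', 'model x'],
--             'full_names': {
--                 'model y': 'Model Y',
--                 'model 3': 'Model 3',
--                 'model s': 'Model S',
--                 'model x': 'Model X'
--             }
--         },
--         'chevrolet': {
--             'models': ['silverado', 'tahoe', 'suburban'],
--             'full_names': {}
--         },
--         'gmc': {
--             'models': ['sierra', 'yukon'],
--             'full_names': {}
--         }
--     }
--
--     # Find make
--     for make, info in makes_models.items():
--         if make in text:
--             # Check full names first (e.g., "gx 460" -> "GX")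
--             for full_name, short_model in info['full_names'].items():
--                 if full_name in text:
--                     return make.title(), short_model
--
--             # Check simple models
--             for model in info['models']:
--                 if model in text:
--                     # Normalize capitalization by make
--                     if make == 'lexus':
--                         # Lexus: all uppercase (GX, RX, ES, etc.)
--                         return 'Lexus', model.upper()
--                     elif make == 'tesla':
--                         # Tesla: Model X format
--                         if model.startswith('model '):
--                             return 'Tesla', 'Model ' + model[-1].upper()
--                         return 'Tesla', model.title()
--                     else:
--                         # Others: Title Case
--                         return make.title(), model.title()
--
--     return '', ''
-- ===== SOURCE B (Python) =====
-- # Flat table-driven rewrite: the nested make->models/full_names dict plus per-make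
-- # normalization rules are precomputed into one ordered table; matching is a single scan.
--
-- # (make_keyword, pattern, make_display, model_display) in the exact priority order
-- # A scans: for each make (dict order), full_names first, then simple models.
-- _TABLE = [
--     ('lexus', 'gx 460', 'Lexus', 'GX'),
--     ('lexus', 'gx 550', 'Lexus', 'GX'),
--     ('lexus', 'lx 570', 'Lexus', 'LX'),
--     ('lexus', 'lx 600', 'Lexus', 'LX'),
--     ('lexus', 'rx 350', 'Lexus', 'RX'),
--     ('lexus', 'rx 400h', 'Lexus', 'RX'),
--     ('lexus', 'es 350', 'Lexus', 'ES'),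
--     ('lexus', 'is 350', 'Lexus', 'IS'),
--     ('lexus', 'gs 350', 'Lexus', 'GS'),
--     ('lexus', 'gs f', 'Lexus', 'GS'),
--     ('lexus', 'rc 350', 'Lexus', 'RC'),
--     ('lexus', 'ls 500', 'Lexus', 'LS'),
--     ('lexus', 'nx 350', 'Lexus', 'NX'),
--     ('lexus', 'gx', 'Lexus', 'GX'),
--     ('lexus', 'lx', 'Lexus', 'LX'),
--     ('lexus', 'rx', 'Lexus', 'RX'),
--     ('lexus', 'nx', 'Lexus', 'NX'),
--     ('lexus', 'es', 'Lexus', 'ES'),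
--     ('lexus', 'is', 'Lexus', 'IS'),
--     ('lexus', 'gs', 'Lexus', 'GS'),
--     ('lexus', 'rc', 'Lexus', 'RC'),
--     ('lexus', 'ls', 'Lexus', 'LS'),
--     ('toyota', 'hilux surf', 'Toyota', 'Hilux'),
--     ('toyota', 'hilux', 'Toyota', 'Hilux'),
--     ('toyota', 'tacoma', 'Toyota', 'Tacoma'),
--     ('toyota', 'tundra', 'Toyota', 'Tundra'),
--     ('toyota', 'sequoia', 'Toyota', 'Sequoia'),
--     ('toyota', '4runner', 'Toyota', '4Runner'),
--     ('toyota', 'highlander', 'Toyota', 'Highlander'),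
--     ('toyota', 'camry', 'Toyota', 'Camry'),
--     ('toyota', 'corolla', 'Toyota', 'Corolla'),
--     ('toyota', 'hilux', 'Toyota', 'Hilux'),
--     ('ford', 'f-150', 'Ford', 'F-150'),
--     ('ford', 'f150', 'Ford', 'F-150'),
--     ('ford', 'f-250', 'Ford', 'F-250'),
--     ('ford', 'f250', 'Ford', 'F-250'),
--     ('ford', 'f-150', 'Ford', 'F-150'),
--     ('ford', 'f150', 'Ford', 'F150'),
--     ('ford', 'f-250', 'Ford', 'F-250'),
--     ('ford', 'f250', 'Ford', 'F250'),
--     ('ford', 'explorer', 'Ford', 'Explorer'),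
--     ('ford', 'expedition', 'Ford', 'Expedition'),
--     ('tesla', 'model y', 'Tesla', 'Model Y'),
--     ('tesla', 'model 3', 'Tesla', 'Model 3'),
--     ('tesla', 'model s', 'Tesla', 'Model S'),
--     ('tesla', 'model x', 'Tesla', 'Model X'),
--     ('tesla', 'model y', 'Tesla', 'Model Y'),
--     ('tesla', 'model 3', 'Tesla', 'Model 3'),
--     ('tesla', 'model s', 'Tesla', 'Model S'),
--     ('tesla', 'model x', 'Tesla', 'Model X'),
--     ('chevrolet', 'silverado', 'Chevrolet', 'Silverado'),
--     ('chevrolet', 'tahoe', 'Chevrolet', 'Tahoe'),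
--     ('chevrolet', 'suburban', 'Chevrolet', 'Suburban'),
--     ('gmc', 'sierra', 'Gmc', 'Sierra'),
--     ('gmc', 'yukon', 'Gmc', 'Yukon'),
-- ]
--
--
-- def extract_make_model(text: str) -> tuple:
--     """Extract make and model from text with normalized capitalization"""
--     t = text.lower()
--     for make_kw, pattern, make_disp, model_disp in _TABLE:
--         if make_kw in t and pattern in t:
--             return make_disp, model_disp
--     return '', ''
-- ===== Notes on version B (the rewrite author's own statement) =====
-- stated objective: simpler
-- what changed: The nested make-dict scan with two inner loops and per-make capitalization branches is replaced by one precomputed flat ordered table of (make keyword, pattern, displays) tuples and a single scan returning the first row whose make keyword and pattern both occur in the lowered text.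
import Mathlib
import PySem

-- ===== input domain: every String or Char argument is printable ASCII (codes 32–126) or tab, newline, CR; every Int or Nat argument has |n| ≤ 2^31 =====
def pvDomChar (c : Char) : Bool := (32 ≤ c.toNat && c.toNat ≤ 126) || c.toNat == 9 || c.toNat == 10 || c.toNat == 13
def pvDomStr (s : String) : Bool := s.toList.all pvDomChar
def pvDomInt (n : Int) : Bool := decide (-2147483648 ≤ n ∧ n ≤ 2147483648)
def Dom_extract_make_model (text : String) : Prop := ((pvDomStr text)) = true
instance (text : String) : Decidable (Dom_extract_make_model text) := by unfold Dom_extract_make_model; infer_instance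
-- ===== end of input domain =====

-- B replaces A's nested dict scan with one precomputed flat ordered table and a single scan (objective: simpler).

-- ===== PORT A =====
-- str.title() is not in PySem: hand port, exact on ASCII (uppercase a char after a
-- non-alphabetic char, lowercase after an alphabetic one).
def pyTitleGo (prev : Bool) : List Char → List Char
  | [] => []
  | c :: cs =>
      (if prev then PySem.Chars.lowerChar c else PySem.Chars.upperChar c) :: pyTitleGo (PySem.Chars.isalpha c) cs

def pyTitle (s : String) : String := String.ofList (pyTitleGo false s.toList)

-- the makes_models dict: (make, full_names items, models)
def pvMakesModels : List (String × List (String × String) × List String) :=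
  [ ("lexus",
      [("gx 460", "GX"), ("gx 550", "GX"), ("lx 570", "LX"), ("lx 600", "LX"),
       ("rx 350", "RX"), ("rx 400h", "RX"), ("es 350", "ES"), ("is 350", "IS"),
       ("gs 350", "GS"), ("gs f", "GS"), ("rc 350", "RC"), ("ls 500", "LS"), ("nx 350", "NX")],
      ["gx", "lx", "rx", "nx", "es", "is", "gs", "rc", "ls"]),
    ("toyota",
      [("hilux surf", "Hilux"), ("hilux", "Hilux")],
      ["tacoma", "tundra", "sequoia", "4runner", "highlander", "camry", "corolla", "hilux"]),
    ("ford",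
      [("f-150", "F-150"), ("f150", "F-150"), ("f-250", "F-250"), ("f250", "F-250")],
      ["f-150", "f150", "f-250", "f250", "explorer", "expedition"]),
    ("tesla",
      [("model y", "Model Y"), ("model 3", "Model 3"), ("model s", "Model S"), ("model x", "Model X")],
      ["model y", "model 3", "model s", "model x"]),
    ("chevrolet", [], ["silverado", "tahoe", "suburban"]),
    ("gmc", [], ["sierra", "yukon"]) ]

-- inner loop over info['full_names'].items()
def pvFullLoop (t make : String) : List (String × String) → Option (String × String)
  | [] => none
  | (full_name, short_model) :: rest =>
      if PySem.Str.isIn full_name t then some (pyTitle make, short_model)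
      else pvFullLoop t make rest

-- inner loop over info['models'].  model[-1].upper() is ported as the one-char
-- slice model[-1:] uppercased — exact here since every model literal is nonempty.
def pvModelLoop (t make : String) : List String → Option (String × String)
  | [] => none
  | model :: rest =>
      if PySem.Str.isIn model t then
        some (if make == "lexus" then ("Lexus", PySem.Str.upper model)
              else if make == "tesla" then
                (if PySem.Str.startswith model "model " then
                   ("Tesla", "Model " ++ PySem.Str.upper (PySem.Str.slice model (some (-1)) none))
                 else ("Tesla", pyTitle model))
              else (pyTitle make, pyTitle model))
      else pvModelLoop t make rest

-- outer loop over makes_models.items()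
def pvMakeLoop (t : String) : List (String × List (String × String) × List String) → String × String
  | [] => ("", "")
  | (make, full_names, models) :: rest =>
      if PySem.Str.isIn make t then
        -- 'return r if the inner loop hit, else fall through' = Option.getD
        (pvFullLoop t make full_names).getD
          ((pvModelLoop t make models).getD (pvMakeLoop t rest))
      else pvMakeLoop t rest

def extract_make_model (text : String) : String × String :=
  pvMakeLoop (PySem.Str.lower text) pvMakesModels

-- ===== PORT B =====
-- the precomputed flat table: (make_keyword, pattern, make_display, model_display)
def pvTable : List (String × String × String × String) :=
  [ ("lexus", "gx 460", "Lexus", "GX"), ("lexus", "gx 550", "Lexus", "GX"),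
    ("lexus", "lx 570", "Lexus", "LX"), ("lexus", "lx 600", "Lexus", "LX"),
    ("lexus", "rx 350", "Lexus", "RX"), ("lexus", "rx 400h", "Lexus", "RX"),
    ("lexus", "es 350", "Lexus", "ES"), ("lexus", "is 350", "Lexus", "IS"),
    ("lexus", "gs 350", "Lexus", "GS"), ("lexus", "gs f", "Lexus", "GS"),
    ("lexus", "rc 350", "Lexus", "RC"), ("lexus", "ls 500", "Lexus", "LS"),
    ("lexus", "nx 350", "Lexus", "NX"),
    ("lexus", "gx", "Lexus", "GX"), ("lexus", "lx", "Lexus", "LX"),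
    ("lexus", "rx", "Lexus", "RX"), ("lexus", "nx", "Lexus", "NX"),
    ("lexus", "es", "Lexus", "ES"), ("lexus", "is", "Lexus", "IS"),
    ("lexus", "gs", "Lexus", "GS"), ("lexus", "rc", "Lexus", "RC"),
    ("lexus", "ls", "Lexus", "LS"),
    ("toyota", "hilux surf", "Toyota", "Hilux"), ("toyota", "hilux", "Toyota", "Hilux"),
    ("toyota", "tacoma", "Toyota", "Tacoma"), ("toyota", "tundra", "Toyota", "Tundra"),
    ("toyota", "sequoia", "Toyota", "Sequoia"), ("toyota", "4runner", "Toyota", "4Runner"),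
    ("toyota", "highlander", "Toyota", "Highlander"), ("toyota", "camry", "Toyota", "Camry"),
    ("toyota", "corolla", "Toyota", "Corolla"), ("toyota", "hilux", "Toyota", "Hilux"),
    ("ford", "f-150", "Ford", "F-150"), ("ford", "f150", "Ford", "F-150"),
    ("ford", "f-250", "Ford", "F-250"), ("ford", "f250", "Ford", "F-250"),
    ("ford", "f-150", "Ford", "F-150"), ("ford", "f150", "Ford", "F150"),
    ("ford", "f-250", "Ford", "F-250"), ("ford", "f250", "Ford", "F250"),
    ("ford", "explorer", "Ford", "Explorer"), ("ford", "expedition", "Ford", "Expedition"),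
    ("tesla", "model y", "Tesla", "Model Y"), ("tesla", "model 3", "Tesla", "Model 3"),
    ("tesla", "model s", "Tesla", "Model S"), ("tesla", "model x", "Tesla", "Model X"),
    ("tesla", "model y", "Tesla", "Model Y"), ("tesla", "model 3", "Tesla", "Model 3"),
    ("tesla", "model s", "Tesla", "Model S"), ("tesla", "model x", "Tesla", "Model X"),
    ("chevrolet", "silverado", "Chevrolet", "Silverado"),
    ("chevrolet", "tahoe", "Chevrolet", "Tahoe"),
    ("chevrolet", "suburban", "Chevrolet", "Suburban"),
    ("gmc", "sierra", "Gmc", "Sierra"), ("gmc", "yukon", "Gmc", "Yukon") ]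

def pvTableLoop (t : String) : List (String × String × String × String) → String × String
  | [] => ("", "")
  | (make_kw, pattern, make_disp, model_disp) :: rest =>
      if PySem.Str.isIn make_kw t && PySem.Str.isIn pattern t then (make_disp, model_disp)
      else pvTableLoop t rest

def extract_make_model_alt (text : String) : String × String :=
  pvTableLoop (PySem.Str.lower text) pvTable

-- ===== PRECONDITION & SPEC =====
def Spec_extract_make_model (text : String) (out : String × String) : Prop := out = extract_make_model_alt text
instance (text : String) (out : String × String) : Decidable (Spec_extract_make_model text out) := by unfold Spec_extract_make_model; infer_instance

-- ===== CLAIM (what is proved, stated in full; the proofs are below) =====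
def Claim_equal_extract_make_model : Prop := ∀ (text : String), Dom_extract_make_model text → Spec_extract_make_model text (extract_make_model text)

-- ===== LEMMAS AND PROOFS =====
theorem pvT1 : pyTitle "lexus" = "Lexus" := by decide
theorem pvT2 : pyTitle "toyota" = "Toyota" := by decide
theorem pvT3 : pyTitle "ford" = "Ford" := by decide
theorem pvT4 : pyTitle "tesla" = "Tesla" := by decide
theorem pvT5 : pyTitle "chevrolet" = "Chevrolet" := by decide
theorem pvT6 : pyTitle "gmc" = "Gmc" := by decide
theorem pvT7 : pyTitle "tacoma" = "Tacoma" := by decide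
theorem pvT8 : pyTitle "tundra" = "Tundra" := by decide
theorem pvT9 : pyTitle "sequoia" = "Sequoia" := by decide
theorem pvT10 : pyTitle "4runner" = "4Runner" := by decide
theorem pvT11 : pyTitle "highlander" = "Highlander" := by decide
theorem pvT12 : pyTitle "camry" = "Camry" := by decide
theorem pvT13 : pyTitle "corolla" = "Corolla" := by decide
theorem pvT14 : pyTitle "hilux" = "Hilux" := by decide
theorem pvT15 : pyTitle "f-150" = "F-150" := by decide
theorem pvT16 : pyTitle "f150" = "F150" := by decide
theorem pvT17 : pyTitle "f-250" = "F-250" := by decide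
theorem pvT18 : pyTitle "f250" = "F250" := by decide
theorem pvT19 : pyTitle "explorer" = "Explorer" := by decide
theorem pvT20 : pyTitle "expedition" = "Expedition" := by decide
theorem pvT21 : pyTitle "silverado" = "Silverado" := by decide
theorem pvT22 : pyTitle "tahoe" = "Tahoe" := by decide
theorem pvT23 : pyTitle "suburban" = "Suburban" := by decide
theorem pvT24 : pyTitle "sierra" = "Sierra" := by decide
theorem pvT25 : pyTitle "yukon" = "Yukon" := by decide
theorem pvT26 : PySem.Str.upper "gx" = "GX" := by decide
theorem pvT27 : PySem.Str.upper "lx" = "LX" := by decide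
theorem pvT28 : PySem.Str.upper "rx" = "RX" := by decide
theorem pvT29 : PySem.Str.upper "nx" = "NX" := by decide
theorem pvT30 : PySem.Str.upper "es" = "ES" := by decide
theorem pvT31 : PySem.Str.upper "is" = "IS" := by decide
theorem pvT32 : PySem.Str.upper "gs" = "GS" := by decide
theorem pvT33 : PySem.Str.upper "rc" = "RC" := by decide
theorem pvT34 : PySem.Str.upper "ls" = "LS" := by decide
theorem pvT35 : ("Model " ++ PySem.Str.upper (PySem.Str.slice "model y" (some (-1)) none)) = "Model Y" := by decide
theorem pvT36 : PySem.Str.startswith "model y" "model " = true := by decide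
theorem pvT37 : ("Model " ++ PySem.Str.upper (PySem.Str.slice "model 3" (some (-1)) none)) = "Model 3" := by decide
theorem pvT38 : PySem.Str.startswith "model 3" "model " = true := by decide
theorem pvT39 : ("Model " ++ PySem.Str.upper (PySem.Str.slice "model s" (some (-1)) none)) = "Model S" := by decide
theorem pvT40 : PySem.Str.startswith "model s" "model " = true := by decide
theorem pvT41 : ("Model " ++ PySem.Str.upper (PySem.Str.slice "model x" (some (-1)) none)) = "Model X" := by decide
theorem pvT42 : PySem.Str.startswith "model x" "model " = true := by decide
theorem pvT43 : ("lexus" == "lexus") = true := by decide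
theorem pvT44 : ("toyota" == "lexus") = false := by decide
theorem pvT45 : ("toyota" == "tesla") = false := by decide
theorem pvT46 : ("ford" == "lexus") = false := by decide
theorem pvT47 : ("ford" == "tesla") = false := by decide
theorem pvT48 : ("tesla" == "lexus") = false := by decide
theorem pvT49 : ("tesla" == "tesla") = true := by decide
theorem pvT50 : ("chevrolet" == "lexus") = false := by decide
theorem pvT51 : ("chevrolet" == "tesla") = false := by decide
theorem pvT52 : ("gmc" == "lexus") = false := by decide
theorem pvT53 : ("gmc" == "tesla") = false := by decide

theorem pvGetD_ite {A : Type} (c : Prop) [Decidable c] (a : A) (b : Option A) (e : A) :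
    (if c then some a else b).getD e = if c then a else b.getD e := by split <;> rfl

set_option maxHeartbeats 4000000 in
theorem pv_main (t : String) : pvMakeLoop t pvMakesModels = pvTableLoop t pvTable := by
  by_cases h1 : PySem.Str.isIn "lexus" t <;>
  by_cases h2 : PySem.Str.isIn "toyota" t <;>
  by_cases h3 : PySem.Str.isIn "ford" t <;>
  by_cases h4 : PySem.Str.isIn "tesla" t <;>
  by_cases h5 : PySem.Str.isIn "chevrolet" t <;>
  by_cases h6 : PySem.Str.isIn "gmc" t <;>
  simp only [pvMakesModels, pvTable, pvMakeLoop, pvFullLoop, pvModelLoop, pvTableLoop,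
    h1, h2, h3, h4, h5, h6, if_true, if_false, Bool.true_and, Bool.false_and,
    pvGetD_ite, Option.getD_none, Option.getD_some,
    Bool.false_eq_true, eq_self_iff_true, pvT1, pvT2, pvT3, pvT4, pvT5, pvT6, pvT7, pvT8, pvT9, pvT10, pvT11, pvT12, pvT13, pvT14, pvT15, pvT16, pvT17, pvT18, pvT19, pvT20, pvT21, pvT22, pvT23, pvT24, pvT25, pvT26, pvT27, pvT28, pvT29, pvT30, pvT31, pvT32, pvT33, pvT34, pvT35, pvT36, pvT37, pvT38, pvT39, pvT40, pvT41, pvT42, pvT43, pvT44, pvT45, pvT46, pvT47, pvT48, pvT49, pvT50, pvT51, pvT52, pvT53]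

-- ===== VERDICT (by name: the statement is the Claim_ definition above) =====
theorem extract_make_model_spec : Claim_equal_extract_make_model := by
  intro text _
  unfold Spec_extract_make_model extract_make_model extract_make_model_alt
  exact pv_main (PySem.Str.lower text)
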